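-- pv_equiv track=rewrite | github.com/sashabaldassin/Jeu-du-pendu | main.py | initialiser_mot_part_decouv
-- ===== SOURCE A (Python) =====
-- def initialiser_mot_part_decouv(mot_myst, car_subst="-"):
-- #Cette fonction renvoie une liste qui affiche la première et dernière lettre du mot à découvrir et des tirets pour chaque lettre à trouver en début de partie.
--
-- 	l1=[]
-- 	nbr=len(mot_myst)-1
-- 	for i in range(len(mot_myst)):
-- 		if i==0 or i==nbr :
-- 			l1.append(mot_myst[i])		#on ajoute la première et la dernière lettre du mot à découvrir dans la liste.
-- 		else :
-- 			l1.append(car_subst)		#on ajoute le caractère dans la liste entre la première et la dernière lettre.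
-- 	return l1
-- ===== SOURCE B (Python) =====
-- def initialiser_mot_part_decouv(mot_myst, car_subst="-"):
--     # Segment concatenation: explicit case split on word length, then
--     # first letter + a block of substitutes for the interior + last letter.
--     n = len(mot_myst)
--     if n == 0:
--         return []
--     if n == 1:
--         return [mot_myst[0]]
--     return [mot_myst[0]] + [car_subst] * (n - 2) + [mot_myst[-1]]
-- ===== Notes on version B (the rewrite author's own statement) =====
-- stated objective: alternative
-- what changed: Replaces A's per-index loop with a conditional inside by an explicit case split on the word length and concatenation of three segments: the first letter, a replicated block of car_subst for the interior, and the last letter (no loop, no per-element branch).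
import Mathlib
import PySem

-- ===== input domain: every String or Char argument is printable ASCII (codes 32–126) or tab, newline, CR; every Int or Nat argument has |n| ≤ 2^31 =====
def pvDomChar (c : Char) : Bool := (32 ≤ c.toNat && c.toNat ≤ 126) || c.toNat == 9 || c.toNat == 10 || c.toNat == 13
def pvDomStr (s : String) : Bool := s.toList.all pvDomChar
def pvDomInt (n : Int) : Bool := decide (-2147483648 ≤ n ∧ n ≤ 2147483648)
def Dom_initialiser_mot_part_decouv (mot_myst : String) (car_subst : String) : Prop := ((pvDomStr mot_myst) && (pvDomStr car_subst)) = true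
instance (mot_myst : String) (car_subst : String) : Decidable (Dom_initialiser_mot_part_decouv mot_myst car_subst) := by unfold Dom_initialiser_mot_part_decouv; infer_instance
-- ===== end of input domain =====

-- B replaces A's per-index loop by a length case split and concatenation of three segments (alternative decomposition, same cost).

-- ===== PORT A =====
-- Literal port of A: loop over range(len(mot_myst)), appending the letter at i==0 or i==nbr, else car_subst.
def initialiser_mot_part_decouv (mot_myst : String) (car_subst : String) : List String :=
  let cs := mot_myst.toList
  let nbr : Int := (cs.length : Int) - 1
  (List.range cs.length).foldl
    (fun (l1 : List String) (i : ℕ) =>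
      if (i : Int) = 0 ∨ (i : Int) = nbr then l1 ++ [String.mk [cs.getD i ' ']]
      else l1 ++ [car_subst]) []

-- ===== PORT B =====
-- Port of B: case split on length; for n ≥ 2, first letter ++ replicated interior ++ last letter.
def initialiser_mot_part_decouv_alt (mot_myst : String) (car_subst : String) : List String :=
  let cs := mot_myst.toList
  let n := cs.length
  if n = 0 then []
  else if n = 1 then [String.mk [cs.getD 0 ' ']]
  else [String.mk [cs.getD 0 ' ']] ++ List.replicate (n - 2) car_subst ++ [String.mk [cs.getD (n - 1) ' ']]

-- ===== PRECONDITION & SPEC =====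
def Spec_initialiser_mot_part_decouv (mot_myst : String) (car_subst : String) (out : List String) : Prop := out = initialiser_mot_part_decouv_alt mot_myst car_subst
instance (mot_myst : String) (car_subst : String) (out : List String) : Decidable (Spec_initialiser_mot_part_decouv mot_myst car_subst out) := by unfold Spec_initialiser_mot_part_decouv; infer_instance

-- ===== CLAIM (what is proved, stated in full; the proofs are below) =====
def Claim_equal_initialiser_mot_part_decouv : Prop := ∀ (mot_myst : String) (car_subst : String), Dom_initialiser_mot_part_decouv mot_myst car_subst → Spec_initialiser_mot_part_decouv mot_myst car_subst (initialiser_mot_part_decouv mot_myst car_subst)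

-- ===== LEMMAS AND PROOFS =====
-- The append-foldl over range equals a map.
theorem pv_foldl_map {α : Type} (f : ℕ → α) (n : ℕ) :
    ∀ acc : List α, (List.range n).foldl (fun l1 i => l1 ++ [f i]) acc = acc ++ (List.range n).map f := by
  induction n with
  | zero => intro acc; simp
  | succ m ih =>
      intro acc
      simp [List.range_succ, List.foldl_append, ih, List.map_append]

-- ===== VERDICT (by name: the statement is the Claim_ definition above) =====
theorem initialiser_mot_part_decouv_spec : Claim_equal_initialiser_mot_part_decouv := by
  intro mot car _
  unfold Spec_initialiser_mot_part_decouv initialiser_mot_part_decouv initialiser_mot_part_decouv_alt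
  set cs := mot.toList with hcs
  simp only
  have hA : (List.range cs.length).foldl
      (fun (l1 : List String) (i : ℕ) =>
        if (i : Int) = 0 ∨ (i : Int) = (cs.length : Int) - 1 then l1 ++ [String.mk [cs.getD i ' ']]
        else l1 ++ [car]) []
      = (List.range cs.length).map (fun (i : ℕ) =>
        if (i : Int) = 0 ∨ (i : Int) = (cs.length : Int) - 1 then String.mk [cs.getD i ' '] else car) := by
    have h := pv_foldl_map (fun (i : ℕ) =>
        if (i : Int) = 0 ∨ (i : Int) = (cs.length : Int) - 1 then String.mk [cs.getD i ' '] else car)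
      cs.length ([] : List String)
    have hfun : (fun (l1 : List String) (i : ℕ) =>
        if (i : Int) = 0 ∨ (i : Int) = (cs.length : Int) - 1 then l1 ++ [String.mk [cs.getD i ' ']]
        else l1 ++ [car])
        = (fun (l1 : List String) (i : ℕ) => l1 ++
          [if (i : Int) = 0 ∨ (i : Int) = (cs.length : Int) - 1 then String.mk [cs.getD i ' '] else car]) := by
      funext l1 i; split_ifs <;> rfl
    rw [hfun, h]
    simp
  rw [hA]
  by_cases h0 : cs.length = 0
  · simp [h0]
  · by_cases h1 : cs.length = 1
    · simp [h1, List.range_succ]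
    · simp only [if_neg h0, if_neg h1]
      apply List.ext_getElem
      · simp; omega
      · intro i hi1 hi2
        have hlen : i < cs.length := by simpa using hi1
        have hn2 : 2 ≤ cs.length := by omega
        simp only [List.getElem_map, List.getElem_range]
        by_cases hz : i = 0
        · subst hz
          have : ((0 : ℕ) : Int) = 0 ∨ ((0 : ℕ) : Int) = (cs.length : Int) - 1 := Or.inl rfl
          rw [if_pos this]
          rw [List.getElem_append_left (by simp)]
          simp
        · by_cases hl : i = cs.length - 1
          · have hc : (i : Int) = 0 ∨ (i : Int) = (cs.length : Int) - 1 := Or.inr (by omega)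
            rw [if_pos hc]
            rw [List.getElem_append_right (by simp; omega)]
            simp [hl]
          · have hc : ¬ ((i : Int) = 0 ∨ (i : Int) = (cs.length : Int) - 1) := by
              push_neg; constructor <;> omega
            rw [if_neg hc]
            rw [List.getElem_append_left (by simp; omega)]
            rw [List.getElem_append_right (by simp; omega)]
            simp
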